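-- pv_equiv track=rewrite | github.com/ahmed-rohan/wumpus-world- | kb_logic.py | normalize_clause
-- ===== SOURCE A (Python) =====
-- from typing import Iterable
--
-- def negate(lit: str) -> str:
--     return lit[1:] if lit.startswith("!") else "!" + lit
--
-- def normalize_clause(literals: Iterable[str]) -> frozenset[str] | None:
--     s: set[str] = set()
--     for raw in literals:
--         lit = str(raw).strip()
--         if not lit or lit == "!":
--             continue
--         comp = negate(lit)
--         if comp in s:
--             return None  # tautology
--         s.add(lit)
--     return frozenset(s)
-- ===== SOURCE B (Python) =====
-- def negate(lit: str) -> str: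
--     return lit[1:] if lit.startswith("!") else "!" + lit
--
-- def normalize_clause(literals):
--     # Pass 1: normalize into an ordered list (duplicates kept).
--     norm = []
--     for raw in literals:
--         lit = str(raw).strip()
--         if lit and lit != "!":
--             norm.append(lit)
--     # Pass 2: first-occurrence index of each literal.
--     first = {}
--     for j, x in enumerate(norm):
--         first.setdefault(x, j)
--     # Pass 3: tautology iff some literal's complement first occurs strictly earlier.
--     n = len(norm)
--     if any(first.get(negate(x), n) < j for j, x in enumerate(norm)):
--         return None
--     return frozenset(norm)
-- ===== Notes on version B (the rewrite author's own statement) =====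
-- stated objective: alternative
-- what changed: A interleaves set-building with an early-exit complement check in one loop; B runs three separate passes: normalize into an ordered list, build a first-occurrence index dict, then scan once checking whether any literal's complement first occurs strictly earlier, building the frozenset only at the end.
import Mathlib
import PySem

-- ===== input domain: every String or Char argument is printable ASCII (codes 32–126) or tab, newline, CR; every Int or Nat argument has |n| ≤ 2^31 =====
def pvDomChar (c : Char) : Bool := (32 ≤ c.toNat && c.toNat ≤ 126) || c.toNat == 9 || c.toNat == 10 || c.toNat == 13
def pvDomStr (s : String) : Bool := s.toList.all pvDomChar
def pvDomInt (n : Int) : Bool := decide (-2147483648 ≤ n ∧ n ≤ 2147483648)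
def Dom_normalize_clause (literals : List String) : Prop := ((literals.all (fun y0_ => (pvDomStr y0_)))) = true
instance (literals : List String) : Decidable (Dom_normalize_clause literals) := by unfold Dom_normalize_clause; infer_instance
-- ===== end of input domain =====

-- B replaces A's interleaved set-building/early-exit loop by three separate passes
-- (normalize to a list, index first occurrences, then scan for an earlier complement);
-- objective: alternative decomposition.

-- ===== PORT A =====
def pvNegate (lit : String) : String :=
  if PySem.Str.startswith lit "!" then PySem.Str.slice lit (some 1) none else "!" ++ lit

def pvGoA (s : PySem.Set String) : List String → Option (List String)
  | [] => some s
  | raw :: rest =>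
    let lit := PySem.Str.strip raw
    if lit = "" ∨ lit = "!" then pvGoA s rest
    else
      let comp := pvNegate lit
      if comp ∈ s then none
      else pvGoA (PySem.Set.add s lit) rest

def normalize_clause (literals : List String) : Option (List String) :=
  pvGoA PySem.Set.empty literals

-- ===== PORT B =====
-- pass 1 of Source B: the normalized list, duplicates kept
def pvNorm : List String → List String
  | [] => []
  | raw :: rest =>
    let lit := PySem.Str.strip raw
    if lit = "" ∨ lit = "!" then pvNorm rest
    else lit :: pvNorm rest

-- pass 2 of Source B: dict of first-occurrence indices (setdefault keeps the first)
def pvFirst (norm : List String) : PySem.Dict String Int :=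
  (PySem.List.enumerate norm 0).foldl
    (fun d p => PySem.Dict.setdefault d p.2 p.1) PySem.Dict.empty

def normalize_clause_alt (literals : List String) : Option (List String) :=
  let norm := pvNorm literals
  let first := pvFirst norm
  let n : Int := norm.length
  -- pass 3 of Source B: tautology iff some literal's complement first occurs strictly earlier
  if (PySem.List.enumerate norm 0).any
       (fun p => decide (PySem.Dict.getD first (pvNegate p.2) n < p.1))
  then none
  else some (PySem.Set.ofList norm)

-- ===== PRECONDITION & SPEC =====
def Spec_normalize_clause (literals : List String) (out : Option (List String)) : Prop := out = normalize_clause_alt literals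
instance (literals : List String) (out : Option (List String)) : Decidable (Spec_normalize_clause literals out) := by unfold Spec_normalize_clause; infer_instance

-- ===== CLAIM (what is proved, stated in full; the proofs are below) =====
def Claim_equal_normalize_clause : Prop := ∀ (literals : List String), Dom_normalize_clause literals → Spec_normalize_clause literals (normalize_clause literals)

-- ===== LEMMAS AND PROOFS =====

-- Proof-side helper: A's complement check along the normalized list, with explicit prefix.
def pvScan (pre : List String) : List String → Bool
  | [] => false
  | x :: rest => if pvNegate x ∈ pre then true else pvScan (pre ++ [x]) rest

-- A's loop, expressed on the normalized list with an arbitrary starting set.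
lemma pvScan_congr (m : List String) : ∀ p q : List String, (∀ y, y ∈ p ↔ y ∈ q) →
    pvScan p m = pvScan q m := by
  induction m with
  | nil => intro p q _; simp [pvScan]
  | cons x rest ih =>
    intro p q hpq
    simp only [pvScan]
    by_cases h : pvNegate x ∈ p
    · simp [h, (hpq _).mp h]
    · have h' : pvNegate x ∉ q := fun hq => h ((hpq _).mpr hq)
      simp only [h, h', if_false]
      exact ih _ _ (by intro y; simp [hpq y])

lemma pvGoA_eq_norm (l : List String) : ∀ s : PySem.Set String,
    pvGoA s l = (if pvScan s (pvNorm l) then none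
                 else some (List.foldl PySem.Set.add s (pvNorm l))) := by
  induction l with
  | nil => intro s; simp [pvGoA, pvNorm, pvScan]
  | cons raw rest ih =>
    intro s
    simp only [pvGoA, pvNorm]
    by_cases h : PySem.Str.strip raw = "" ∨ PySem.Str.strip raw = "!"
    · simp [h, ih]
    · simp only [h, if_false]
      by_cases hc : pvNegate (PySem.Str.strip raw) ∈ s
      · simp [hc, pvScan]
      · have hm : pvScan (s ++ [PySem.Str.strip raw]) (pvNorm rest)
            = pvScan (PySem.Set.add s (PySem.Str.strip raw)) (pvNorm rest) := by
          apply pvScan_congr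
          intro y; simp [PySem.Set.mem_add]
        simp [hc, ih, pvScan, hm]

-- pvScan is true iff some position's complement lies in the prefix before it.
lemma pvScan_iff (m : List String) : ∀ p : List String,
    pvScan p m = true ↔ ∃ (j : Nat) (h : j < m.length), pvNegate m[j] ∈ p ++ m.take j := by
  induction m with
  | nil => intro p; simp [pvScan]
  | cons x rest ih =>
    intro p
    simp only [pvScan]
    by_cases h : pvNegate x ∈ p
    · simp only [h, if_true, true_iff]
      refine ⟨0, by simp, ?_⟩
      simpa using h
    · simp only [h, if_false, ih]
      constructor
      · rintro ⟨j, hj, hmem⟩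
        refine ⟨j + 1, by simpa using Nat.succ_lt_succ hj, ?_⟩
        rw [List.getElem_cons_succ, List.take_succ_cons]
        simpa [List.append_assoc] using hmem
      · rintro ⟨j, hj, hmem⟩
        cases j with
        | zero => simp at hmem; exact absurd hmem h
        | succ j' =>
          refine ⟨j', by simpa using Nat.lt_of_succ_lt_succ hj, ?_⟩
          rw [List.getElem_cons_succ, List.take_succ_cons] at hmem
          simpa [List.append_assoc] using hmem

-- the first-occurrence dict: lookup = offset first index
lemma pvFirst_fold_get? (m : List String) : ∀ (s : Int) (d : PySem.Dict String Int) (k : String),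
    PySem.Dict.get? ((PySem.List.enumerate m s).foldl
        (fun d p => PySem.Dict.setdefault d p.2 p.1) d) k
      = (match PySem.Dict.get? d k with
         | some v => some v
         | none => (PySem.List.index? m k).map (fun i => s + (i : Int))) := by
  induction m with
  | nil =>
    intro s d k
    rw [PySem.List.enumerate_nil]
    simp only [List.foldl_nil]
    cases hd : PySem.Dict.get? d k <;> simp
  | cons x rest ih =>
    intro s d k
    rw [PySem.List.enumerate_cons]
    simp only [List.foldl_cons, ih]
    by_cases hk : k = x
    · subst hk
      rw [PySem.Dict.get?_setdefault_self, PySem.List.index?_cons_self]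
      cases hd : PySem.Dict.get? d k <;> simp
    · rw [PySem.Dict.get?_setdefault_of_ne d s hk,
          PySem.List.index?_cons_of_ne rest (fun e => hk e.symm)]
      cases hd : PySem.Dict.get? d k
      · cases hi : PySem.List.index? rest k
        · simp
        · simp; ring_nf
      · simp

lemma pvFirst_get? (m : List String) (k : String) :
    PySem.Dict.get? (pvFirst m) k = (PySem.List.index? m k).map (fun i => (i : Int)) := by
  unfold pvFirst
  rw [pvFirst_fold_get? m 0 PySem.Dict.empty k]
  have h0 : PySem.Dict.get? (PySem.Dict.empty : PySem.Dict String Int) k = none := rfl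
  rw [h0]
  cases hi : PySem.List.index? m k <;> simp

-- membership in a prefix, via the first-occurrence index
lemma mem_take_iff_first (m : List String) (k : String) (j : Nat) (hj : j ≤ m.length) :
    k ∈ m.take j ↔ (PySem.Dict.getD (pvFirst m) k (m.length : Int) < (j : Int)) := by
  cases hi : PySem.List.index? m k with
  | none =>
    have hk : k ∉ m := (PySem.List.index?_eq_none_iff m k).mp hi
    have hval : PySem.Dict.getD (pvFirst m) k (m.length : Int) = (m.length : Int) := by
      unfold PySem.Dict.getD; rw [pvFirst_get?, hi]; rfl
    rw [hval]
    constructor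
    · intro hmem; exact absurd (List.mem_of_mem_take hmem) hk
    · intro hlt; exfalso; omega
  | some i =>
    obtain ⟨hik, hget, hmin⟩ := PySem.List.getElem_of_index?_eq_some hi
    have hval : PySem.Dict.getD (pvFirst m) k (m.length : Int) = (i : Int) := by
      unfold PySem.Dict.getD; rw [pvFirst_get?, hi]; rfl
    rw [hval, Nat.cast_lt]
    constructor
    · intro hmem
      obtain ⟨a, ha, hae⟩ := List.getElem_of_mem hmem
      have ha2 : a < j ∧ a < m.length := by simpa [List.length_take] using ha
      have haj : (m.take j)[a]'ha = m[a]'ha2.2 := List.getElem_take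
      by_contra hij
      exact hmin a (by omega) (by rw [← haj, hae])
    · intro hij
      have hlen : i < (m.take j).length := by
        rw [List.length_take]; exact lt_min hij hik
      have heq : (m.take j)[i]'hlen = m[i]'hik := List.getElem_take
      rw [← hget, ← heq]
      exact List.getElem_mem _

-- the B-side any over enumerate equals pvScan with empty prefix
lemma pvAny_eq_scan (m : List String) :
    ((PySem.List.enumerate m 0).any
        (fun p => decide (PySem.Dict.getD (pvFirst m) (pvNegate p.2) (m.length : Int) < p.1)))
      = pvScan [] m := by
  by_cases h : pvScan [] m = true
  · rw [h, List.any_eq_true]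
    obtain ⟨j, hj, hmem⟩ := (pvScan_iff m []).mp h
    refine ⟨((j : Int), m[j]), ?_, ?_⟩
    · rw [PySem.List.mem_enumerate_iff]
      exact ⟨j, hj, by simp⟩
    · simp only [decide_eq_true_eq]
      exact (mem_take_iff_first m (pvNegate m[j]) j (by omega)).mp (by simpa using hmem)
  · rw [Bool.not_eq_true] at h
    rw [h, List.any_eq_false]
    rintro ⟨i, x⟩ hp
    rw [PySem.List.mem_enumerate_iff] at hp
    obtain ⟨j, hj, he⟩ := hp
    obtain ⟨hi, hx⟩ := Prod.mk.injEq .. ▸ he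
    simp only [decide_eq_true_eq]
    intro hlt
    apply absurd _ (by rw [h]; simp : ¬ pvScan [] m = true)
    refine (pvScan_iff m []).mpr ⟨j, hj, ?_⟩
    simp only [List.nil_append]
    subst hx
    refine (mem_take_iff_first m (pvNegate m[j]) j (by omega)).mpr ?_
    simpa [hi] using hlt

lemma pvFoldl_add_ofList (m : List String) :
    List.foldl PySem.Set.add PySem.Set.empty m = PySem.Set.ofList m := by
  rw [PySem.Set.ofList_eq_foldl]; rfl

-- ===== VERDICT (by name: the statement is the Claim_ definition above) =====
theorem normalize_clause_spec : Claim_equal_normalize_clause := by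
  intro literals _
  show normalize_clause literals = normalize_clause_alt literals
  unfold normalize_clause normalize_clause_alt
  rw [pvGoA_eq_norm, pvFoldl_add_ofList]
  simp only [pvAny_eq_scan]
  rfl
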